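-- pv_equiv track=rewrite | github.com/Marr0x/Heuristieken | tests/mutationpoints.py | mutationpoints
-- ===== SOURCE A (Python) =====
-- def mutationpoints(genome):
--
--     mutationpoints = 0
--
--     for gene in genome:
--         solution_index = gene - 1
--         gene_index = genome.index(gene)
--
--         if gene_index != solution_index:
--             mutationpoints += abs(solution_index - gene_index)
--
--     return mutationpoints
-- ===== SOURCE B (Python) =====
-- def mutationpoints(genome):
--     # Repeatedly strip the leading value: the head (index, value) pair gives the
--     # displacement shared by all occurrences of that value; count them, add the
--     # weighted displacement, drop them, and continue on what remains.
--     total = 0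
--     pairs = list(enumerate(genome))
--     while pairs:
--         f, x = pairs[0]
--         total += sum(1 for _, v in pairs if v == x) * abs(x - 1 - f)
--         pairs = [(i, v) for i, v in pairs if v != x]
--     return total
-- ===== Notes on version B (the rewrite author's own statement) =====
-- stated objective: alternative
-- what changed: A loops over every element and rescans the list with genome.index for each; B works on an (index,value) pair list that it repeatedly strips: the head pair gives the shared displacement of all occurrences of its value, which are counted, weighted and removed before continuing on the remaining pairs (one outer iteration per distinct value, no index lookups).
import Mathlib
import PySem

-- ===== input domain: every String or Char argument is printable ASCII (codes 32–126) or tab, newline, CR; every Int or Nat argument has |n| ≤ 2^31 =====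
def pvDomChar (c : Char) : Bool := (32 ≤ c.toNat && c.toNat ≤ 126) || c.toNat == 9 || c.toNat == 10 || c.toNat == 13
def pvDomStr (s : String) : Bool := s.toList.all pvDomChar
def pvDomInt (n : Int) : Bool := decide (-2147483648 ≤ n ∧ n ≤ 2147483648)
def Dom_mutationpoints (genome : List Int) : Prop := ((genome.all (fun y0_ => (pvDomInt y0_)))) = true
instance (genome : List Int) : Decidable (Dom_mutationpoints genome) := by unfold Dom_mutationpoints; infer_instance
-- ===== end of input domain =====

-- B replaces A's per-element genome.index rescan by repeatedly stripping the leading value of an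
-- (index, value) pair list: count its occurrences, add the weighted displacement, filter them out.

-- ===== PORT A =====
-- genome.index(gene): Python raises ValueError only when gene is absent, but here gene ∈ genome
-- always, so index? is some and `.getD 0` is exact.
def mutationpoints (genome : List Int) : Int :=
  genome.foldl
    (fun mp gene =>
      let solution_index : Int := gene - 1
      let gene_index : Int := ((PySem.List.index? genome gene).getD 0 : Nat)
      if gene_index ≠ solution_index then mp + |solution_index - gene_index| else mp)
    0

-- ===== PORT B =====
-- the while loop of Source B: head pair (f, x), count value-x pairs, weight, filter them out, recurse
def mutationpointsGo : List (Int × Int) → Int → Int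
  | [], total => total
  | (f, x) :: rest, total =>
      mutationpointsGo (rest.filter (fun q => !(q.2 == x)))
        (total + (((f, x) :: rest).countP (fun q => q.2 == x) : Int) * |x - 1 - f|)
termination_by pairs _ => pairs.length
decreasing_by
  simp only [List.unattach_filter, List.unattach_attach]
  exact Nat.lt_succ_of_le (List.length_filter_le _ _)

def mutationpoints_alt (genome : List Int) : Int :=
  mutationpointsGo (PySem.List.enumerate genome) 0

-- ===== PRECONDITION & SPEC =====
def Spec_mutationpoints (genome : List Int) (out : Int) : Prop := out = mutationpoints_alt genome
instance (genome : List Int) (out : Int) : Decidable (Spec_mutationpoints genome out) := by unfold Spec_mutationpoints; infer_instance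

-- ===== CLAIM (what is proved, stated in full; the proofs are below) =====
def Claim_equal_mutationpoints : Prop := ∀ (genome : List Int), Dom_mutationpoints genome → Spec_mutationpoints genome (mutationpoints genome)

-- ===== LEMMAS AND PROOFS =====

/-- The first-occurrence index of `g` in `genome`, as A uses it. -/
def geneIdx (genome : List Int) (g : Int) : Int :=
  ((PySem.List.index? genome g).getD 0 : Nat)

/-- First index recorded for value `v` in a pair list. -/
def fidx (P : List (Int × Int)) (v : Int) : Int :=
  ((P.find? (fun q => q.2 == v)).getD (0, 0)).1

/-- The displacement sum over a pair list, each pair weighted by its value's first index. -/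
def fsum (P : List (Int × Int)) : Int :=
  (P.map (fun p => |p.2 - 1 - fidx P p.2|)).sum

/-- A's loop body adds the per-gene displacement (also when the `if` adds nothing). -/
lemma A_body (genome : List Int) (mp gene : Int) :
    (let solution_index : Int := gene - 1
     let gene_index : Int := ((PySem.List.index? genome gene).getD 0 : Nat)
     if gene_index ≠ solution_index then mp + |solution_index - gene_index| else mp)
      = mp + |(gene - 1) - geneIdx genome gene| := by
  show (if (((PySem.List.index? genome gene).getD 0 : Nat) : Int) ≠ gene - 1 then
          mp + |(gene - 1) - (((PySem.List.index? genome gene).getD 0 : Nat) : Int)| else mp)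
      = mp + |(gene - 1) - geneIdx genome gene|
  unfold geneIdx
  by_cases h : (((PySem.List.index? genome gene).getD 0 : Nat) : Int) = gene - 1
  · rw [if_neg (not_not_intro h), h]
    simp
  · rw [if_pos h]

/-- A is the sum of per-gene displacements. -/
lemma mutationpoints_eq_sum (genome : List Int) :
    mutationpoints genome
      = (genome.map (fun g => |(g - 1) - geneIdx genome g|)).sum := by
  unfold mutationpoints
  rw [PySem.List.foldl_congr_mem genome _
        (fun mp gene => mp + |(gene - 1) - geneIdx genome gene|) 0
        (fun acc x _ => A_body genome acc x),
      PySem.List.foldl_add]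
  simp

/-- Filtering out value-`x` pairs does not change the first pair of any other value. -/
lemma find?_filter_ne (l : List (Int × Int)) (x v : Int) (h : v ≠ x) :
    (l.filter (fun q => !(q.2 == x))).find? (fun q => q.2 == v)
      = l.find? (fun q => q.2 == v) := by
  induction l with
  | nil => rfl
  | cons a t ih =>
    rw [List.filter_cons]
    by_cases hax : a.2 = x
    · rw [if_neg (by simp [hax]), ih, List.find?_cons_of_neg (by simp [hax, Ne.symm h])]
    · rw [if_pos (by simp [hax])]
      by_cases hav : a.2 = v
      · rw [List.find?_cons_of_pos (by simp [hav]), List.find?_cons_of_pos (by simp [hav])]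
      · rw [List.find?_cons_of_neg (by simp [hav]), List.find?_cons_of_neg (by simp [hav]), ih]

/-- `fidx` on a cons, away from the head's value. -/
lemma fidx_cons_ne (f x : Int) (rest : List (Int × Int)) (v : Int) (h : v ≠ x) :
    fidx ((f, x) :: rest) v = fidx rest v := by
  unfold fidx
  rw [List.find?_cons_of_neg]
  simp [Ne.symm h]

/-- The strip loop returns its accumulator plus the displacement sum. -/
lemma go_eq (P : List (Int × Int)) (t : Int) :
    mutationpointsGo P t = t + fsum P := by
  induction P, t using mutationpointsGo.induct with
  | case1 t => simp [mutationpointsGo, fsum]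
  | case2 f x rest t ih =>
    simp only [List.unattach_filter, List.unattach_attach] at ih
    rw [mutationpointsGo, ih]
    have hperm := List.filter_append_perm (fun q : Int × Int => q.2 == x) rest
    have hsum : (rest.map (fun p => |p.2 - 1 - fidx ((f, x) :: rest) p.2|)).sum
        = ((rest.filter (fun q => q.2 == x)).map
              (fun p => |p.2 - 1 - fidx ((f, x) :: rest) p.2|)).sum
          + ((rest.filter (fun q => !(q.2 == x))).map
              (fun p => |p.2 - 1 - fidx ((f, x) :: rest) p.2|)).sum := by
      rw [← List.sum_append, ← List.map_append]
      exact ((hperm.map _).sum_eq).symm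
    have hmatch : ((rest.filter (fun q => q.2 == x)).map
          (fun p => |p.2 - 1 - fidx ((f, x) :: rest) p.2|)).sum
        = ((rest.countP (fun q => q.2 == x)) : Int) * |x - 1 - f| := by
      have hmapc : (rest.filter (fun q => q.2 == x)).map
            (fun p => |p.2 - 1 - fidx ((f, x) :: rest) p.2|)
          = (rest.filter (fun q => q.2 == x)).map (fun _ => |x - 1 - f|) := by
        apply List.map_congr_left
        intro p hp
        have hpx : p.2 = x := by
          have := (List.mem_filter.mp hp).2
          simpa using this
        have hfi : fidx ((f, x) :: rest) p.2 = f := by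
          unfold fidx
          rw [List.find?_cons_of_pos]
          · rfl
          · simp [hpx]
        rw [hfi, hpx]
      rw [hmapc, List.map_const', List.sum_replicate, ← List.countP_eq_length_filter, nsmul_eq_mul]
    have hrest : ((rest.filter (fun q => !(q.2 == x))).map
          (fun p => |p.2 - 1 - fidx ((f, x) :: rest) p.2|)).sum
        = fsum (rest.filter (fun q => !(q.2 == x))) := by
      unfold fsum
      apply congrArg
      apply List.map_congr_left
      intro p hp
      have hpx : p.2 ≠ x := by
        have := (List.mem_filter.mp hp).2
        simpa using this
      rw [fidx_cons_ne f x rest p.2 hpx]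
      unfold fidx
      rw [find?_filter_ne rest x p.2 hpx]
    have hhead : fidx ((f, x) :: rest) x = f := by
      unfold fidx
      rw [List.find?_cons_of_pos]
      · rfl
      · simp
    unfold fsum
    rw [List.map_cons, List.sum_cons, hsum, hmatch, hrest, hhead, List.countP_cons]
    simp only [show ((x == x) = true) by simp, if_pos]
    unfold fsum
    push_cast; ring

/-- `find?` on the enumeration finds the first occurrence, at its `index?` offset. -/
lemma find?_enumerate (xs : List Int) :
    ∀ (s : Int) (v : Int),
      (PySem.List.enumerate xs s).find? (fun q => q.2 == v)
        = (PySem.List.index? xs v).map (fun k : Nat => (s + (k : Int), v)) := by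
  induction xs with
  | nil => intro s v; simp [PySem.List.enumerate_nil, PySem.List.index?_eq_idxOf?]
  | cons x t ih =>
    intro s v
    rw [PySem.List.enumerate_cons]
    by_cases hv : x = v
    · subst hv
      rw [List.find?_cons_of_pos (by simp), PySem.List.index?_cons_self]
      simp
    · rw [List.find?_cons_of_neg (by simp [hv]), ih,
          PySem.List.index?_cons_of_ne t hv]
      cases hidx : PySem.List.index? t v with
      | none => simp
      | some k =>
        simp only [Option.map_some]
        congr 2
        push_cast
        ring

/-- On the enumeration of the genome, `fidx` is the first-occurrence index. -/
lemma fidx_enumerate (genome : List Int) (v : Int) (hv : v ∈ genome) :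
    fidx (PySem.List.enumerate genome) v = geneIdx genome v := by
  rcases Option.isSome_iff_exists.mp
    ((PySem.List.index?_isSome_iff genome v).mpr hv) with ⟨k, hk⟩
  unfold fidx geneIdx
  rw [find?_enumerate, hk]
  simp

/-- B is the sum of per-gene displacements. -/
lemma mutationpoints_alt_eq_sum (genome : List Int) :
    mutationpoints_alt genome
      = (genome.map (fun g => |(g - 1) - geneIdx genome g|)).sum := by
  unfold mutationpoints_alt
  rw [go_eq, fsum]
  have hmem : ∀ p ∈ PySem.List.enumerate genome, p.2 ∈ genome := by
    intro p hp
    have := List.mem_map_of_mem (f := fun q : Int × Int => q.2) hp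
    rwa [PySem.List.map_snd_enumerate] at this
  have hcongr : (PySem.List.enumerate genome).map
        (fun p => |p.2 - 1 - fidx (PySem.List.enumerate genome) p.2|)
      = (PySem.List.enumerate genome).map (fun p => |(p.2 - 1) - geneIdx genome p.2|) := by
    apply List.map_congr_left
    intro p hp
    rw [fidx_enumerate genome p.2 (hmem p hp)]
  rw [hcongr, show (fun p : Int × Int => |(p.2 - 1) - geneIdx genome p.2|)
        = (fun g : Int => |(g - 1) - geneIdx genome g|) ∘ (fun p : Int × Int => p.2) from rfl,
      ← List.map_map, PySem.List.map_snd_enumerate]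
  exact zero_add _

-- ===== VERDICT (by name: the statement is the Claim_ definition above) =====
theorem mutationpoints_spec : Claim_equal_mutationpoints := by
  intro genome _
  unfold Spec_mutationpoints
  rw [mutationpoints_eq_sum, mutationpoints_alt_eq_sum]
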